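-- pv_equiv track=rewrite | github.com/nbarker2021/Storage | cqe_unified_repository.tar_1/cqe_unified/cqe/slices.py | _adjacent_transpositions
-- ===== SOURCE A (Python) =====
-- from typing import Dict, List, Any, Tuple, Generator, Callable, Optional
--
-- def _adjacent_transpositions(prev: List[int], curr: List[int]) -> int:
--     # Count inversions between adjacent elements moving from prev to curr (small topk, O(n^2) ok)
--     pos_curr = {v: i for i, v in enumerate(curr)}
--     common = [v for v in prev if v in pos_curr]
--     mapped = [pos_curr[v] for v in common]
--     inv = 0
--     for i in range(len(mapped)):
--         for j in range(i+1, len(mapped)):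
--             if mapped[i] > mapped[j]:
--                 inv += 1
--     return inv
-- ===== SOURCE B (Python) =====
-- def _adjacent_transpositions(prev, curr):
--     # Merge-sort inversion counting: O(n log n) instead of A's O(n^2) pair scan.
--     pos_curr = {v: i for i, v in enumerate(curr)}
--     mapped = [pos_curr[v] for v in prev if v in pos_curr]
--
--     def msort(xs):
--         if len(xs) < 2:
--             return 0, xs
--         mid = len(xs) // 2
--         ca, left = msort(xs[:mid])
--         cb, right = msort(xs[mid:])
--         merged = []
--         i = j = 0
--         c = ca + cb
--         while i < len(left) and j < len(right):
--             if left[i] <= right[j]: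
--                 merged.append(left[i]); i += 1
--             else:
--                 merged.append(right[j]); j += 1; c += len(left) - i
--         merged.extend(left[i:]); merged.extend(right[j:])
--         return c, merged
--
--     return msort(mapped)[0]
-- ===== Notes on version B (the rewrite author's own statement) =====
-- stated objective: faster
-- what changed: Replaced the quadratic nested index-pair scan over the mapped positions by merge-sort inversion counting (count cross-inversions while merging sorted halves).
import Mathlib
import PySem

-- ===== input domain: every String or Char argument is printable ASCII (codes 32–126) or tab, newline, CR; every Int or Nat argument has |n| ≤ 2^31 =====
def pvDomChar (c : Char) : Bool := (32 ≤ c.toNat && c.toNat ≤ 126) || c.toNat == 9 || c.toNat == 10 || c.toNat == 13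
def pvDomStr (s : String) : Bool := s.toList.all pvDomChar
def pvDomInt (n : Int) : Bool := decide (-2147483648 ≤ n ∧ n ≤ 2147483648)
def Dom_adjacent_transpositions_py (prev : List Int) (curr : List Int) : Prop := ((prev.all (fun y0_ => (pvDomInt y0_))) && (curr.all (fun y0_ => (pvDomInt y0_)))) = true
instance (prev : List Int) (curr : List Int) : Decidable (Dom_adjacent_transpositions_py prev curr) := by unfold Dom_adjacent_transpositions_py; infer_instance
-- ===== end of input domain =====

-- B replaces A's quadratic nested index-pair scan by merge-sort inversion counting (objective: faster).

-- ===== PORT A =====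
-- pos_curr = {v: i for i, v in enumerate(curr)}; common/mapped comprehensions; nested index loops.
def adjacent_transpositions_py (prev : List Int) (curr : List Int) : Int :=
  let pos_curr : PySem.Dict Int Int :=
    (PySem.List.enumerate curr 0).foldl (fun d p => d.insert p.2 p.1) PySem.Dict.empty
  let common : List Int := prev.filter (fun v => pos_curr.contains v)
  -- pos_curr[v]: v is filtered by membership, so the lookup always succeeds; getD 0 is never the default
  let mapped : List Int := common.map (fun v => (pos_curr.get? v).getD 0)
  (PySem.List.pyRange 0 (mapped.length : Int) 1).foldl (fun inv i =>
    (PySem.List.pyRange (i + 1) (mapped.length : Int) 1).foldl (fun inv j =>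
      if PySem.List.pyGetD mapped j 0 < PySem.List.pyGetD mapped i 0 then inv + 1 else inv) inv) 0

-- ===== PORT B =====
-- merge step of Source B: merge two runs, adding the remaining left length for each element taken from the right
def pvMergeCnt : List Int → List Int → Int × List Int
  | [], r => (0, r)
  | a :: ls, [] => (0, a :: ls)
  | a :: ls, b :: rs =>
    if a ≤ b then
      let (c, m) := pvMergeCnt ls (b :: rs)
      (c, a :: m)
    else
      let (c, m) := pvMergeCnt (a :: ls) rs
      (c + ((ls.length : Int) + 1), b :: m)
termination_by l r => l.length + r.length

-- msort of Source B: split at len//2, recurse, merge counting cross inversions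
def pvMsortCnt (xs : List Int) : Int × List Int :=
  if _h : xs.length < 2 then (0, xs)
  else
    let mid := xs.length / 2
    let (ca, l) := pvMsortCnt (xs.take mid)
    let (cb, r) := pvMsortCnt (xs.drop mid)
    let (cc, m) := pvMergeCnt l r
    (ca + cb + cc, m)
termination_by xs.length
decreasing_by
  · simp [List.length_take]; omega
  · simp [List.length_drop]; omega

def adjacent_transpositions_py_alt (prev : List Int) (curr : List Int) : Int :=
  let pos_curr : PySem.Dict Int Int :=
    (PySem.List.enumerate curr 0).foldl (fun d p => d.insert p.2 p.1) PySem.Dict.empty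
  let mapped : List Int :=
    (prev.filter (fun v => pos_curr.contains v)).map (fun v => (pos_curr.get? v).getD 0)
  (pvMsortCnt mapped).1

-- ===== PRECONDITION & SPEC =====
def Spec_adjacent_transpositions_py (prev : List Int) (curr : List Int) (out : Int) : Prop := out = adjacent_transpositions_py_alt prev curr
instance (prev : List Int) (curr : List Int) (out : Int) : Decidable (Spec_adjacent_transpositions_py prev curr out) := by unfold Spec_adjacent_transpositions_py; infer_instance

-- ===== CLAIM (what is proved, stated in full; the proofs are below) =====
def Claim_equal_adjacent_transpositions_py : Prop := ∀ (prev : List Int) (curr : List Int), Dom_adjacent_transpositions_py prev curr → Spec_adjacent_transpositions_py prev curr (adjacent_transpositions_py prev curr)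

-- ===== LEMMAS AND PROOFS =====

-- number of elements of ys strictly below a
def pvCrossOne (a : Int) (ys : List Int) : Nat := ys.countP (fun b => decide (b < a))

-- cross inversions: pairs (x from l, y from r) with y < x
def pvCross (l r : List Int) : Nat := (l.map (fun a => pvCrossOne a r)).sum

-- inversion count of a list
def pvInv : List Int → Nat
  | [] => 0
  | a :: t => pvCrossOne a t + pvInv t

theorem pvCrossOne_append (a : Int) (xs ys : List Int) :
    pvCrossOne a (xs ++ ys) = pvCrossOne a xs + pvCrossOne a ys := by
  simp [pvCrossOne, List.countP_append]

theorem pvCross_cons_right (l : List Int) (b : Int) (rs : List Int) :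
    pvCross l (b :: rs) = l.countP (fun x => decide (b < x)) + pvCross l rs := by
  induction l with
  | nil => simp [pvCross]
  | cons a t ih =>
    simp only [pvCross, List.map_cons, List.sum_cons, List.countP_cons]
    simp only [pvCross] at ih
    rw [ih]
    simp only [pvCrossOne, List.countP_cons]
    omega

theorem pvInv_append (xs ys : List Int) :
    pvInv (xs ++ ys) = pvInv xs + pvInv ys + pvCross xs ys := by
  induction xs with
  | nil => simp [pvInv, pvCross]
  | cons a t ih =>
    simp only [List.cons_append, pvInv, ih, pvCrossOne_append, pvCross, List.map_cons,
      List.sum_cons]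
    omega

theorem pvCross_perm_left {l l' : List Int} (h : l.Perm l') (r : List Int) :
    pvCross l r = pvCross l' r := by
  exact List.Perm.sum_eq (List.Perm.map _ h)

theorem pvCross_perm_right (l : List Int) {r r' : List Int} (h : r.Perm r') :
    pvCross l r = pvCross l r' := by
  unfold pvCross
  congr 1
  exact List.map_congr_left (fun a _ => List.Perm.countP_eq _ h)

theorem pvMergeCnt_spec : ∀ (l r : List Int), l.Sorted (· ≤ ·) → r.Sorted (· ≤ ·) →
    (pvMergeCnt l r).1 = (pvCross l r : Int) ∧ (pvMergeCnt l r).2.Perm (l ++ r) ∧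
      (pvMergeCnt l r).2.Sorted (· ≤ ·) := by
  intro l
  induction l with
  | nil => intro r _ hr; simp [pvMergeCnt, pvCross, hr]
  | cons a ls ihl =>
    intro r
    induction r with
    | nil =>
      intro hl _
      refine ⟨?_, by simp [pvMergeCnt], by simpa [pvMergeCnt] using hl⟩
      simp [pvMergeCnt, pvCross, pvCrossOne]
    | cons b rs ihr =>
      intro hl hr
      have hls : ls.Sorted (· ≤ ·) := (List.sorted_cons.mp hl).2
      have hrs : rs.Sorted (· ≤ ·) := (List.sorted_cons.mp hr).2
      have hale : ∀ x ∈ ls, a ≤ x := (List.sorted_cons.mp hl).1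
      have hble : ∀ x ∈ rs, b ≤ x := (List.sorted_cons.mp hr).1
      by_cases hab : a ≤ b
      · obtain ⟨hc, hp, hs⟩ := ihl (b :: rs) hls hr
        have hcross0 : pvCrossOne a (b :: rs) = 0 := by
          simp only [pvCrossOne, List.countP_eq_zero]
          intro x hx
          simp only [decide_eq_true_eq, not_lt]
          rcases List.mem_cons.mp hx with h1 | h2
          · omega
          · have := hble x h2; omega
        have hcr : pvCross (a :: ls) (b :: rs) = pvCross ls (b :: rs) := by
          simp [pvCross, hcross0]
        constructor
        · simp only [pvMergeCnt, if_pos hab, hcr]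
          exact hc
        constructor
        · simp only [pvMergeCnt, if_pos hab]
          exact (hp.cons a)
        · simp only [pvMergeCnt, if_pos hab]
          refine List.sorted_cons.mpr ⟨?_, hs⟩
          intro x hx
          have hx' : x ∈ ls ++ b :: rs := hp.mem_iff.mp hx
          rcases List.mem_append.mp hx' with h1 | h2
          · exact hale x h1
          · rcases List.mem_cons.mp h2 with h3 | h4
            · omega
            · have := hble x h4; omega
      · obtain ⟨hc, hp, hs⟩ := ihr hl hrs
        have hcount : (a :: ls).countP (fun x => decide (b < x)) = ls.length + 1 := by
          have : ∀ x ∈ a :: ls, (fun x => decide (b < x)) x = true := by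
            intro x hx
            rcases List.mem_cons.mp hx with h1 | h2
            · simp; omega
            · have := hale x h2; simp; omega
          rw [List.countP_eq_length.mpr this]; simp
        constructor
        · simp only [pvMergeCnt, if_neg hab]
          rw [pvCross_cons_right, hcount]
          push_cast
          omega
        constructor
        · simp only [pvMergeCnt, if_neg hab]
          exact (hp.cons b).trans (List.perm_middle).symm
        · simp only [pvMergeCnt, if_neg hab]
          refine List.sorted_cons.mpr ⟨?_, hs⟩
          intro x hx
          have hx' : x ∈ (a :: ls) ++ rs := hp.mem_iff.mp hx
          rcases List.mem_append.mp hx' with h1 | h2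
          · rcases List.mem_cons.mp h1 with h3 | h4
            · omega
            · have := hale x h4; omega
          · exact hble x h2

theorem pvMsortCnt_spec : ∀ (xs : List Int),
    (pvMsortCnt xs).1 = (pvInv xs : Int) ∧ (pvMsortCnt xs).2.Perm xs ∧
      (pvMsortCnt xs).2.Sorted (· ≤ ·) := by
  intro xs
  fun_induction pvMsortCnt xs with
  | case1 xs h =>
    rcases xs with _ | ⟨a, _ | ⟨b, t⟩⟩
    · exact ⟨by simp [pvInv], by simp, List.sorted_nil⟩
    · exact ⟨by simp [pvInv, pvCrossOne], by simp, List.pairwise_singleton _ a⟩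
    · simp at h
  | case2 xs h mid ca l hl cb r hr cc m hm ihl ihr =>
    obtain ⟨ihl1, ihl2, ihl3⟩ := ihl
    obtain ⟨ihr1, ihr2, ihr3⟩ := ihr
    rw [hl] at ihl1 ihl2 ihl3
    rw [hr] at ihr1 ihr2 ihr3
    obtain ⟨hc1, hc2, hc3⟩ := pvMergeCnt_spec l r ihl3 ihr3
    rw [hm] at hc1 hc2 hc3
    refine ⟨?_, ?_, hc3⟩
    · have hsplit : xs = xs.take mid ++ xs.drop mid := (List.take_append_drop mid xs).symm
      have hinv : pvInv xs = pvInv (xs.take mid) + pvInv (xs.drop mid) +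
          pvCross (xs.take mid) (xs.drop mid) := by
        conv_lhs => rw [hsplit]
        exact pvInv_append _ _
      have hcr : pvCross l r = pvCross (xs.take mid) (xs.drop mid) := by
        rw [pvCross_perm_left ihl2, pvCross_perm_right _ ihr2]
      have e1 : ca = (pvInv (xs.take mid) : Int) := ihl1
      have e2 : cb = (pvInv (xs.drop mid) : Int) := ihr1
      have e3 : cc = (pvCross (xs.take mid) (xs.drop mid) : Int) := by
        rw [← hcr]; exact hc1
      show ca + cb + cc = (pvInv xs : Int)
      rw [e1, e2, e3, hinv]
      push_cast
      ring
    · exact hc2.trans ((ihl2.append ihr2).trans (by rw [List.take_append_drop]))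

-- the index-k summand of A's outer loop, summed over range, is the inversion count
theorem pvSum_eq_inv (t : List Int) :
    ((List.range t.length).map (fun k => (pvCrossOne (t.getD k 0) (t.drop (k + 1)) : Int))).sum
    = (pvInv t : Int) := by
  induction t with
  | nil => simp [pvInv]
  | cons a s ih =>
    rw [show (a :: s).length = s.length + 1 from rfl, List.range_succ_eq_map]
    simp only [List.map_cons, List.sum_cons, List.map_map]
    have hcomp : ∀ k ∈ List.range s.length,
        ((fun k => (pvCrossOne ((a :: s).getD k 0) ((a :: s).drop (k + 1)) : Int)) ∘ Nat.succ) k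
        = (fun k : Nat => (pvCrossOne (s.getD k 0) (s.drop (k + 1)) : Int)) k := by
      intro k _
      simp [List.getD]
    rw [List.map_congr_left hcomp, ih]
    simp [pvInv, List.getD]

-- A's nested loops compute pvInv of the mapped list
theorem pvLoopA_eq_inv (m : List Int) :
    (PySem.List.pyRange 0 (m.length : Int) 1).foldl (fun inv i =>
      (PySem.List.pyRange (i + 1) (m.length : Int) 1).foldl (fun inv j =>
        if PySem.List.pyGetD m j 0 < PySem.List.pyGetD m i 0 then inv + 1 else inv) inv) 0
    = (pvInv m : Int) := by
  have hinner : ∀ acc : Int, ∀ i : Int, i ∈ PySem.List.pyRange 0 (m.length : Int) 1 →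
      (PySem.List.pyRange (i + 1) (m.length : Int) 1).foldl (fun inv j =>
        if PySem.List.pyGetD m j 0 < PySem.List.pyGetD m i 0 then inv + 1 else inv) acc
      = acc + (pvCrossOne (PySem.List.pyGetD m i 0) (m.drop (i + 1).toNat) : Int) := by
    intro acc i hi
    have h0 : (0 : Int) ≤ i := (PySem.List.mem_pyRange_one.mp hi).1
    rw [PySem.List.foldl_pyRange_pyGetD' m 0
      (fun inv x => if x < PySem.List.pyGetD m i 0 then inv + 1 else inv) acc (by omega)]
    rw [PySem.List.foldl_ite_add_one]
    rfl
  have hcongr := PySem.List.foldl_congr_mem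
    (l := PySem.List.pyRange 0 (m.length : Int) 1) (init := (0 : Int))
    (f := fun inv i => (PySem.List.pyRange (i + 1) (m.length : Int) 1).foldl (fun inv j =>
      if PySem.List.pyGetD m j 0 < PySem.List.pyGetD m i 0 then inv + 1 else inv) inv)
    (g := fun inv i => inv + (pvCrossOne (PySem.List.pyGetD m i 0) (m.drop (i + 1).toNat) : Int))
    (fun acc x hx => hinner acc x hx)
  rw [hcongr]
  rw [PySem.List.foldl_add
    (g := fun i => (pvCrossOne (PySem.List.pyGetD m i 0) (m.drop (i + 1).toNat) : Int))]
  rw [PySem.List.pyRange_zero_natCast, List.map_map]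
  have hcomp : ∀ k ∈ List.range m.length,
      ((fun i => (pvCrossOne (PySem.List.pyGetD m i 0) (m.drop (i + 1).toNat) : Int)) ∘
        (fun k : Nat => (k : Int))) k
      = (fun k : Nat => (pvCrossOne (m.getD k 0) (m.drop (k + 1)) : Int)) k := by
    intro k _
    have h1 : ((k : Int) + 1).toNat = k + 1 := by omega
    simp only [Function.comp_apply, PySem.List.pyGetD_natCast, h1]
  rw [List.map_congr_left hcomp]
  have hfinal := pvSum_eq_inv m
  omega

-- ===== VERDICT (by name: the statement is the Claim_ definition above) =====
theorem adjacent_transpositions_py_spec : Claim_equal_adjacent_transpositions_py := by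
  intro prev curr _
  unfold Spec_adjacent_transpositions_py adjacent_transpositions_py adjacent_transpositions_py_alt
  simp only
  rw [pvLoopA_eq_inv, (pvMsortCnt_spec _).1]
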